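-- pv_equiv track=rewrite | github.com/realronaldrump/everystreet-new | setup/services/bouncie_webhooks.py | _select_webhook_candidate
-- ===== SOURCE A (Python) =====
-- from typing import Any
--
-- LIVE_TRIP_WEBHOOK_NAME = "EveryStreet Live Trip Tracking"
--
-- def _normalize_webhook_url(url: str | None) -> str | None:
--     if not url:
--         return None
--     stripped = str(url).strip()
--     if not stripped:
--         return None
--     return stripped.rstrip("/")
--
-- def _select_webhook_candidate(
--     webhooks: list[dict[str, Any]],
--     webhook_url: str,
-- ) -> dict[str, Any] | None:
--     normalized_target = _normalize_webhook_url(webhook_url)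
--     if normalized_target:
--         for webhook in webhooks:
--             current_url = _normalize_webhook_url(webhook.get("url"))
--             if current_url == normalized_target:
--                 return webhook
--     for webhook in webhooks:
--         if str(webhook.get("name") or "").strip() == LIVE_TRIP_WEBHOOK_NAME:
--             return webhook
--     return None
-- ===== SOURCE B (Python) =====
-- LIVE_TRIP_WEBHOOK_NAME = "EveryStreet Live Trip Tracking"
--
-- def _normalize_webhook_url(url):
--     if not url:
--         return None
--     stripped = str(url).strip()
--     if not stripped:
--         return None
--     return stripped.rstrip("/")
--
-- def _select_webhook_candidate(webhooks, webhook_url):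
--     target = _normalize_webhook_url(webhook_url)
--     name_fallback = None
--     for webhook in webhooks:
--         if target and _normalize_webhook_url(webhook.get("url")) == target:
--             return webhook
--         if name_fallback is None and str(webhook.get("name") or "").strip() == LIVE_TRIP_WEBHOOK_NAME:
--             name_fallback = webhook
--     return name_fallback
-- ===== Notes on version B (the rewrite author's own statement) =====
-- stated objective: alternative
-- what changed: Replaces A's two sequential scans (URL scan, then a full name scan) with a single pass that returns on the first URL match and records the first name match in a fallback accumulator returned after the loop.
import Mathlib
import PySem

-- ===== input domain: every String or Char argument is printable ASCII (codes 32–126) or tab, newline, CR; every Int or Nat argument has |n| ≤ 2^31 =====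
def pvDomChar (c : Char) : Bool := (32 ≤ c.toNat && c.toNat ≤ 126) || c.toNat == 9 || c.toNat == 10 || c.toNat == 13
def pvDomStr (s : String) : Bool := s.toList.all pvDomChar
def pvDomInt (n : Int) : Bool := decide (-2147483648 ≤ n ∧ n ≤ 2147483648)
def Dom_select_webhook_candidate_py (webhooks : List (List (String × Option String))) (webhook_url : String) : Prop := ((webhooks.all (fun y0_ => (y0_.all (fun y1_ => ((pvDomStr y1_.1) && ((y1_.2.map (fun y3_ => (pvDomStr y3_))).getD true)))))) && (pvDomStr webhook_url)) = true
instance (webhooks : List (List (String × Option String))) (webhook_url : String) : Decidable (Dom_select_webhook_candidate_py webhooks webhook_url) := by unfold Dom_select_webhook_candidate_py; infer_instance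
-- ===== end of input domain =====

-- B merges A's two sequential scans into one pass with a name-match fallback accumulator (objective: alternative).


-- ===== PORT A =====
-- shared constant
def liveTripWebhookName : String := "EveryStreet Live Trip Tracking"

-- dict.get(k): first match in the association list; a missing key and a stored None both give none
def pyDictGet (d : List (String × Option String)) (k : String) : Option String :=
  match d.find? (fun p => p.1 == k) with
  | none => none
  | some p => p.2

-- hand port of str.rstrip("/"): drop trailing '/' characters (exact: no PySem right-only chars-strip)
def pyRstripSlash (s : String) : String :=
  String.ofList ((s.toList.reverse.dropWhile (fun c => c == '/')).reverse)

-- port of _normalize_webhook_url (shared by both Pythons verbatim)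
def normalizeWebhookUrl (url : Option String) : Option String :=
  match url with
  | none => none
  | some u =>
    if u = "" then none
    else
      let stripped := PySem.Str.strip u
      if stripped = "" then none
      else some (pyRstripSlash stripped)

-- per-element tests, shared verbatim by both Pythons
def urlMatches (tv : String) (w : List (String × Option String)) : Bool :=
  normalizeWebhookUrl (pyDictGet w "url") == some tv

def nameMatches (w : List (String × Option String)) : Bool :=
  PySem.Str.strip ((pyDictGet w "name").getD "") == liveTripWebhookName

-- A: a URL scan (only when the normalized target is truthy), then a separate name scan
def select_webhook_candidate_py (webhooks : List (List (String × Option String))) (webhook_url : String) : Option (List (String × Option String)) :=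
  let t := normalizeWebhookUrl (some webhook_url)
  match t with
  | some tv =>
    if tv ≠ "" then
      match webhooks.find? (urlMatches tv) with
      | some w => some w
      | none => webhooks.find? nameMatches
    else webhooks.find? nameMatches
  | none => webhooks.find? nameMatches

-- ===== PORT B =====
-- Python truthiness of an Optional[str]
def optStrTruthy : Option String → Bool
  | none => false
  | some s => s ≠ ""

-- the single loop: return on a URL match, record the first name match in fb
def altLoop (t : Option String) (ws : List (List (String × Option String)))
    (fb : Option (List (String × Option String))) : Option (List (String × Option String)) :=
  match ws with
  | [] => fb
  | w :: rest =>
    if optStrTruthy t && (normalizeWebhookUrl (pyDictGet w "url") == t) then some w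
    else altLoop t rest (if fb.isNone && nameMatches w then some w else fb)

def select_webhook_candidate_py_alt (webhooks : List (List (String × Option String))) (webhook_url : String) : Option (List (String × Option String)) :=
  altLoop (normalizeWebhookUrl (some webhook_url)) webhooks none

-- ===== PRECONDITION & SPEC =====
def Spec_select_webhook_candidate_py (webhooks : List (List (String × Option String))) (webhook_url : String) (out : Option (List (String × Option String))) : Prop := out = select_webhook_candidate_py_alt webhooks webhook_url
instance (webhooks : List (List (String × Option String))) (webhook_url : String) (out : Option (List (String × Option String))) : Decidable (Spec_select_webhook_candidate_py webhooks webhook_url out) := by unfold Spec_select_webhook_candidate_py; infer_instance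

-- ===== CLAIM (what is proved, stated in full; the proofs are below) =====
def Claim_equal_select_webhook_candidate_py : Prop := ∀ (webhooks : List (List (String × Option String))) (webhook_url : String), Dom_select_webhook_candidate_py webhooks webhook_url → Spec_select_webhook_candidate_py webhooks webhook_url (select_webhook_candidate_py webhooks webhook_url)

-- ===== LEMMAS AND PROOFS =====

-- when the target is falsy the loop never hits the URL branch: result = fb, else first name match
theorem altLoop_falsy (t : Option String) (ht : optStrTruthy t = false)
    (ws : List (List (String × Option String))) (fb : Option (List (String × Option String))) :
    altLoop t ws fb = fb.or (ws.find? nameMatches) := by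
  induction ws generalizing fb with
  | nil => cases fb <;> simp [altLoop]
  | cons w rest ih =>
    rw [altLoop, ht]
    simp only [Bool.false_and, if_false]
    rw [ih]
    cases fb with
    | some f => simp [List.find?]
    | none =>
      by_cases hn : nameMatches w = true <;>
        simp [List.find?_cons, hn]

-- when the target is a truthy some tv: first URL match wins, else fb, else first name match
theorem altLoop_truthy (tv : String) (htv : tv ≠ "")
    (ws : List (List (String × Option String))) (fb : Option (List (String × Option String))) :
    altLoop (some tv) ws fb =
      ((ws.find? (urlMatches tv)).or (fb.or (ws.find? nameMatches))) := by
  induction ws generalizing fb with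
  | nil => cases fb <;> simp [altLoop]
  | cons w rest ih =>
    rw [altLoop]
    by_cases hu : urlMatches tv w = true
    · have : (optStrTruthy (some tv) && (normalizeWebhookUrl (pyDictGet w "url") == some tv)) = true := by
        simp [optStrTruthy, htv]
        simpa [urlMatches] using hu
      rw [this]
      simp [List.find?_cons, hu]
    · have : (optStrTruthy (some tv) && (normalizeWebhookUrl (pyDictGet w "url") == some tv)) = false := by
        simp [optStrTruthy, htv]
        simpa [urlMatches] using hu
      rw [this]
      simp only [if_false, Bool.false_eq_true]
      rw [ih]
      cases fb with
      | some f => simp [List.find?_cons, hu]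
      | none =>
        by_cases hn : nameMatches w = true <;>
          simp [List.find?_cons, hu, hn]

-- ===== VERDICT (by name: the statement is the Claim_ definition above) =====
theorem select_webhook_candidate_py_spec : Claim_equal_select_webhook_candidate_py := by
  intro webhooks webhook_url _
  unfold Spec_select_webhook_candidate_py select_webhook_candidate_py select_webhook_candidate_py_alt
  cases ht : normalizeWebhookUrl (some webhook_url) with
  | none =>
    rw [altLoop_falsy _ (by simp [optStrTruthy])]
    simp
  | some tv =>
    by_cases htv : tv = ""
    · subst htv
      rw [altLoop_falsy _ (by simp [optStrTruthy])]
      simp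
    · rw [altLoop_truthy tv htv]
      simp only [ne_eq, htv, not_false_iff, if_true]
      cases hf : webhooks.find? (urlMatches tv) <;> simp [Option.or]
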